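-- pv_equiv track=rewrite | github.com/JaeEunSeo/algol_python | 다이나믹 프로그래밍/완전범죄.py | solution
-- ===== SOURCE A (Python) =====
-- def solution(info, n, m):
--     dp = [{} for _ in range(len(info))]
--
--     if n - info[0][0] > 0:
--         dp[0][(n - info[0][0], m)] = info[0][0]
--     if m - info[0][1] > 0:
--         dp[0][(n, m - info[0][1])] = 0
--
--     for i in range(1, len(info)):
--         for (prev_n, prev_m), prev_A in dp[i-1].items():
--             # A가 훔치는 경우
--             if prev_n - info[i][0] > 0:
--                 new_state = (prev_n - info[i][0], prev_m)
--                 new_A = prev_A + info[i][0]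
--                 if new_state not in dp[i] or dp[i][new_state] > new_A:
--                     dp[i][new_state] = new_A
--
--             # B가 훔치는 경우
--             if prev_m - info[i][1] > 0:
--                 new_state = (prev_n, prev_m - info[i][1])
--                 new_A = prev_A
--                 if new_state not in dp[i] or dp[i][new_state] > new_A:
--                     dp[i][new_state] = new_A
--
--     if dp[-1]:
--         return min(dp[-1].values())
--
--     return -1
-- ===== SOURCE B (Python) =====
-- def solution(info, n, m):
--     # Two-phase layered-DAG evaluation: a forward pass collects the reachable
--     # budget states per item (no costs), then backward induction computes the
--     # least alarm noise thief A must make from each state to finish the job;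
--     # the answer is read off at the root state.
--     N = len(info)
--     layers = [{(n, m)}]
--     for i in range(N):
--         a, b = info[i][0], info[i][1]
--         nxt = set()
--         for (nl, ml) in layers[i]:
--             if nl - a > 0:
--                 nxt.add((nl - a, ml))
--             if ml - b > 0:
--                 nxt.add((nl, ml - b))
--         layers.append(nxt)
--     value = {s: 0 for s in layers[N]}
--     for i in range(N - 1, -1, -1):
--         a, b = info[i][0], info[i][1]
--         prev = {}
--         for (nl, ml) in layers[i]:
--             best = None
--             if nl - a > 0:
--                 v = value.get((nl - a, ml))
--                 if v is not None and (best is None or v + a < best):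
--                     best = v + a
--             if ml - b > 0:
--                 v = value.get((nl, ml - b))
--                 if v is not None and (best is None or v < best):
--                     best = v
--             if best is not None:
--                 prev[(nl, ml)] = best
--         value = prev
--     r = value.get((n, m))
--     return r if r is not None else -1
-- ===== Notes on version B (the rewrite author's own statement) =====
-- stated objective: alternative
-- what changed: A runs a single forward DP that carries the minimal accumulated A-noise per joint remaining-budget state and takes a min over the last layer's values; B instead evaluates the layered DAG in two passes: a forward reachability pass that collects only the reachable budget states per item (sets, no costs), then backward induction computing each state's cost-to-go (least remaining alarm noise), reading the answer off the single root state with no final scan.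
-- outside the precondition, e.g. on solution([(5, 2), (9,)], -1, -1): A returns -1, B raises IndexError
-- crash fix: On empty info A raises IndexError (it reads info[0]); B returns 0, the alarm level when there is nothing to steal. — e.g. on solution([], 5, 5): A raises IndexError, B returns 0
import Mathlib
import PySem

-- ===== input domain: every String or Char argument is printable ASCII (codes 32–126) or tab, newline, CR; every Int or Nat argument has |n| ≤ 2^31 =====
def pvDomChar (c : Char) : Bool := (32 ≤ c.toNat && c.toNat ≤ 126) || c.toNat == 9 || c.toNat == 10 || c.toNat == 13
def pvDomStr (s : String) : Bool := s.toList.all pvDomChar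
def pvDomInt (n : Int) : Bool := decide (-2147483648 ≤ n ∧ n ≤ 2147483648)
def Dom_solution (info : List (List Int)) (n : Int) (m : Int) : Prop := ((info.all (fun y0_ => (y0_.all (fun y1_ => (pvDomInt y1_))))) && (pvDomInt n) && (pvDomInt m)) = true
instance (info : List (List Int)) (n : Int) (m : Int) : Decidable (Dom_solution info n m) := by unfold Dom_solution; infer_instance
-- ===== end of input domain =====

-- B replaces A's forward min-cost DP (per-state accumulated noise + final min scan) by a
-- two-phase layered-DAG evaluation: a forward reachability pass without costs, then
-- backward induction computing the cost-to-go of each state; answer read off at the root.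

-- ===== PORT A =====
-- info[i][j]; in range on every input admitted by Pre_solution
def rowA (row : List Int) (j : Int) : Int := (PySem.List.pyGet? row j).getD 0

-- `if new_state not in d or d[new_state] > v: d[new_state] = v`
def updA (d : PySem.Dict (Int × Int) Int) (k : Int × Int) (v : Int) : PySem.Dict (Int × Int) Int :=
  match d.get? k with
  | none => d.insert k v
  | some old => if old > v then d.insert k v else d

-- the inner `for (prev_n, prev_m), prev_A in dp[i-1].items()` loop building dp[i]
def stepA (row : List Int) (prev : PySem.Dict (Int × Int) Int) : PySem.Dict (Int × Int) Int :=
  prev.items.foldl (fun cur e =>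
    let cur := if e.1.1 - rowA row 0 > 0 then updA cur (e.1.1 - rowA row 0, e.1.2) (e.2 + rowA row 0) else cur
    if e.1.2 - rowA row 1 > 0 then updA cur (e.1.1, e.1.2 - rowA row 1) e.2 else cur)
    PySem.Dict.empty

def solution (info : List (List Int)) (n : Int) (m : Int) : Int :=
  let row0 := (PySem.List.pyGet? info 0).getD []
  let d0 : PySem.Dict (Int × Int) Int := PySem.Dict.empty
  let d0 := if n - rowA row0 0 > 0 then d0.insert (n - rowA row0 0, m) (rowA row0 0) else d0
  let d0 := if m - rowA row0 1 > 0 then d0.insert (n, m - rowA row0 1) 0 else d0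
  -- `for i in range(1, len(info))`: dp[i] computed from dp[i-1]; dps holds the dp list, newest first
  let dps := (info.drop 1).foldl (fun dps row => stepA row (dps.headD PySem.Dict.empty) :: dps) [d0]
  let last := dps.headD PySem.Dict.empty   -- dp[-1]
  if last.items ≠ [] then (PySem.List.min? last.values (fun x => x)).getD 0 else -1

-- ===== PORT B =====
-- forward pass body for one item: successors of the reachable budget states (a set, no costs)
def fwdStep (r : List Int) (cur : PySem.Set (Int × Int)) : PySem.Set (Int × Int) :=
  cur.foldl (fun nxt s =>
    let nxt := if s.1 - (PySem.List.pyGet? r 0).getD 0 > 0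
               then PySem.Set.add nxt (s.1 - (PySem.List.pyGet? r 0).getD 0, s.2) else nxt
    if s.2 - (PySem.List.pyGet? r 1).getD 0 > 0
    then PySem.Set.add nxt (s.1, s.2 - (PySem.List.pyGet? r 1).getD 0) else nxt)
    PySem.Set.empty

-- backward pass body for one item: per reachable state, the None-aware min of the two
-- successor costs-to-go (`best`), stored only when feasible
def bwdStep (r : List Int) (layer : PySem.Set (Int × Int)) (value : PySem.Dict (Int × Int) Int) : PySem.Dict (Int × Int) Int :=
  layer.foldl (fun prev s =>
    let best : Option Int :=
      if s.1 - (PySem.List.pyGet? r 0).getD 0 > 0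
      then (value.get? (s.1 - (PySem.List.pyGet? r 0).getD 0, s.2)).map (· + (PySem.List.pyGet? r 0).getD 0)
      else none
    let best : Option Int :=
      if s.2 - (PySem.List.pyGet? r 1).getD 0 > 0
      then match best, value.get? (s.1, s.2 - (PySem.List.pyGet? r 1).getD 0) with
           | none, v => v
           | some x, none => some x
           | some x, some v => some (min x v)
      else best
    match best with
    | some v => prev.insert s v
    | none => prev)
    PySem.Dict.empty

def solution_alt (info : List (List Int)) (n : Int) (m : Int) : Int :=
  -- `layers` held newest-first (the Python appends; both passes read it sequentially)
  let revLayers := info.foldl (fun ls r => fwdStep r (ls.headD PySem.Set.empty) :: ls)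
                     [PySem.Set.ofList [(n, m)]]
  -- `value = {s: 0 for s in layers[N]}`
  let value0 := (revLayers.headD PySem.Set.empty).foldl
                  (fun d s => d.insert s 0) PySem.Dict.empty
  -- `for i in range(N - 1, -1, -1)`: items and their entry layers, deepest first
  let valueF := ((info.reverse).zip (revLayers.drop 1)).foldl
                  (fun value p => bwdStep p.1 p.2 value) value0
  match valueF.get? (n, m) with
  | some v => v
  | none => -1

-- ===== PRECONDITION & SPEC =====
-- Pre_ excludes empty info and rows shorter than 2: A reads info[i][0]/info[i][1] and raises
-- there (except that a short later row is never read once the dict is empty and A returns -1),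
-- while B unconditionally reads row[0]/row[1] of every row and raises.
def Pre_solution (info : List (List Int)) (n : Int) (m : Int) : Prop :=
  info ≠ [] ∧ ∀ row ∈ info, 2 ≤ row.length
instance (info : List (List Int)) (n : Int) (m : Int) : Decidable (Pre_solution info n m) := by unfold Pre_solution; infer_instance
def pvWitness_solution : List (List Int) × Int × Int := ([[1, 2], [3, 1]], 4, 4)

-- On empty info A raises IndexError (it reads info[0]); B returns 0, the alarm level when there is nothing to steal.
def Raises_solution (info : List (List Int)) (n : Int) (m : Int) : Prop := info = []
instance (info : List (List Int)) (n : Int) (m : Int) : Decidable (Raises_solution info n m) := by unfold Raises_solution; infer_instance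
def pvRaiseWitness_solution : List (List Int) × Int × Int := ([], 5, 5)
def pvRaiseWitnessOut_solution : Int := 0

def Spec_solution (info : List (List Int)) (n : Int) (m : Int) (out : Int) : Prop := out = solution_alt info n m
instance (info : List (List Int)) (n : Int) (m : Int) (out : Int) : Decidable (Spec_solution info n m out) := by unfold Spec_solution; infer_instance

-- ===== CLAIM (what is proved, stated in full; the proofs are below) =====
def Claim_equal_solution : Prop := ∀ (info : List (List Int)) (n : Int) (m : Int), Dom_solution info n m → Pre_solution info n m → Spec_solution info n m (solution info n m)
def Claim_raises_solution : Prop := (∀ (info : List (List Int)) (n : Int) (m : Int), Dom_solution info n m → Raises_solution info n m → ¬ Pre_solution info n m) ∧ (Dom_solution (pvRaiseWitness_solution.1) (pvRaiseWitness_solution.2.1) (pvRaiseWitness_solution.2.2) ∧ Raises_solution (pvRaiseWitness_solution.1) (pvRaiseWitness_solution.2.1) (pvRaiseWitness_solution.2.2) ∧ solution_alt (pvRaiseWitness_solution.1) (pvRaiseWitness_solution.2.1) (pvRaiseWitness_solution.2.2) = pvRaiseWitnessOut_solution)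

-- ===== LEMMAS AND PROOFS =====

-- None-aware minimum (Python's `best`-accumulation), and its fold over a list
def omin : Option Int → Option Int → Option Int
  | none, y => y
  | some a, none => some a
  | some a, some b => some (min a b)

def ominList {α : Type} (f : α → Option Int) (l : List α) : Option Int :=
  l.foldr (fun e acc => omin (f e) acc) none

theorem omin_assoc (x y z : Option Int) : omin (omin x y) z = omin x (omin y z) := by
  cases x <;> cases y <;> cases z <;> simp [omin, min_assoc]

theorem omin_comm (x y : Option Int) : omin x y = omin y x := by
  cases x <;> cases y <;> simp [omin, min_comm]

theorem omin_none_right (x : Option Int) : omin x none = x := by cases x <;> rfl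

theorem ominList_nil {α : Type} (f : α → Option Int) : ominList f [] = none := rfl

theorem ominList_cons {α : Type} (f : α → Option Int) (e : α) (t : List α) :
    ominList f (e :: t) = omin (f e) (ominList f t) := rfl

theorem ominList_append {α : Type} (f : α → Option Int) (l1 l2 : List α) :
    ominList f (l1 ++ l2) = omin (ominList f l1) (ominList f l2) := by
  induction l1 with
  | nil => rfl
  | cons e t ih => simp only [List.cons_append, ominList_cons, ih, omin_assoc]

-- absorption through a member: if some listed value already undercuts y, omin-ing y changes nothing
theorem ominList_absorb {α : Type} {f : α → Option Int} {l : List α} {e : α} {y : Option Int}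
    (he : e ∈ l) (h : omin (f e) y = f e) : omin (ominList f l) y = ominList f l := by
  induction l with
  | nil => simp at he
  | cons e' t ih =>
    rw [ominList_cons]
    rcases List.mem_cons.mp he with rfl | he'
    · rw [omin_comm (f e) (ominList f t), omin_assoc, h]
    · rw [omin_assoc, ih he']

-- shifting a cost onto an optional cost-to-go
def oadd (c : Int) : Option Int → Option Int
  | none => none
  | some v => some (v + c)

theorem oadd_zero (o : Option Int) : oadd 0 o = o := by cases o <;> simp [oadd]

theorem oadd_omin (c : Int) (x y : Option Int) : oadd c (omin x y) = omin (oadd c x) (oadd c y) := by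
  cases x <;> cases y <;> simp [oadd, omin] <;> omega

theorem oadd_oadd (c c' : Int) (o : Option Int) : oadd c (oadd c' o) = oadd (c' + c) o := by
  cases o <;> simp [oadd] <;> ring

theorem omin_oadd_le {v w : Int} (h : v ≤ w) (o : Option Int) :
    omin (oadd w o) (oadd v o) = oadd v o := by
  cases o <;> simp [oadd, omin] <;> omega

theorem map_add_eq_oadd (c : Int) (o : Option Int) : o.map (· + c) = oadd c o := by
  cases o <;> rfl

-- the cost-to-go of the remaining items from budgets (nl, ml): the least extra noise
-- thief A must make, none if no feasible assignment of the remaining items exists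
def msolve : List (List Int) → Int → Int → Option Int
  | [], _, _ => some 0
  | r :: t, nl, ml =>
      omin (if nl - rowA r 0 > 0 then oadd (rowA r 0) (msolve t (nl - rowA r 0) ml) else none)
           (if ml - rowA r 1 > 0 then msolve t nl (ml - rowA r 1) else none)

-- the total cost of one forward dict entry: accumulated noise plus cost-to-go
def term (t : List (List Int)) (e : (Int × Int) × Int) : Option Int :=
  oadd e.2 (msolve t e.1.1 e.1.2)

-- ===== A side: the forward fold preserves  ominList (term remaining) dp.items  =====

theorem keys_split {d : PySem.Dict (Int × Int) Int} {k : Int × Int} {old : Int}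
    {l1 l2 : List ((Int × Int) × Int)} (hnd : d.keys.Nodup)
    (hsplit : d.items = l1 ++ (k, old) :: l2) :
    (∀ p ∈ l1, p.1 ≠ k) ∧ (∀ p ∈ l2, p.1 ≠ k) := by
  have h := hnd
  simp only [PySem.Dict.keys, hsplit, List.map_append, List.map_cons] at h
  rw [List.nodup_append] at h
  obtain ⟨h1, h2, h3⟩ := h
  constructor
  · intro p hp hpk
    exact h3 _ (List.mem_map_of_mem hp) _ (List.mem_cons_self ..) hpk
  · intro p hp hpk
    rw [List.nodup_cons] at h2
    exact h2.1 (hpk ▸ List.mem_map_of_mem hp)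

theorem Mval_updA (t : List (List Int)) (d : PySem.Dict (Int × Int) Int)
    (hnd : d.keys.Nodup) (k : Int × Int) (v : Int) :
    ominList (term t) (updA d k v).items
    = omin (ominList (term t) d.items) (oadd v (msolve t k.1 k.2)) := by
  unfold updA
  cases hget : d.get? k with
  | none =>
    have hc : d.contains k = false := by rw [PySem.Dict.contains_eq_isSome_get?, hget]; rfl
    show ominList (term t) (d.insert k v).items = _
    rw [PySem.Dict.items_insert_of_not_contains, ominList_append, ominList_cons,
      ominList_nil, omin_none_right]
    · rfl
    · exact hc
  | some old =>
    have hc : d.contains k = true := by rw [PySem.Dict.contains_eq_isSome_get?, hget]; rfl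
    have hmem : (k, old) ∈ d.items := PySem.Dict.mem_items_of_get?_eq_some d hget
    obtain ⟨l1, l2, hsplit⟩ := List.append_of_mem hmem
    obtain ⟨hk1, hk2⟩ := keys_split hnd hsplit
    have hmap1 : l1.map (fun p => if p.1 == k then (k, v) else p) = l1 := by
      rw [List.map_congr_left (g := id) (fun p hp => by
        have := hk1 p hp; simp [this]), List.map_id]
    have hmap2 : l2.map (fun p => if p.1 == k then (k, v) else p) = l2 := by
      rw [List.map_congr_left (g := id) (fun p hp => by
        have := hk2 p hp; simp [this]), List.map_id]
    have hins : (d.insert k v).items = l1 ++ (k, v) :: l2 := by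
      rw [PySem.Dict.items_insert_of_contains, hsplit]
      · simp only [List.map_append, List.map_cons, hmap1, hmap2, BEq.rfl, if_pos]
      · exact hc
    by_cases hlt : old > v
    · show ominList (term t) (if old > v then d.insert k v else d).items = _
      rw [if_pos hlt, hins, hsplit]
      rw [ominList_append, ominList_append, ominList_cons, ominList_cons]
      show omin (ominList (term t) l1) (omin (term t (k, v)) (ominList (term t) l2))
        = omin (omin (ominList (term t) l1) (omin (term t (k, old)) (ominList (term t) l2)))
            (term t (k, v))
      have habs : omin (term t (k, old)) (term t (k, v)) = term t (k, v) := by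
        show omin (oadd old (msolve t k.1 k.2)) (oadd v (msolve t k.1 k.2)) = oadd v (msolve t k.1 k.2)
        exact omin_oadd_le (by omega) _
      generalize ominList (term t) l1 = M1
      generalize ominList (term t) l2 = M2
      rw [omin_assoc, omin_assoc, omin_comm M2 (term t (k, v)), ← omin_assoc (term t (k, old)),
        habs]
    · show ominList (term t) (if old > v then d.insert k v else d).items = _
      rw [if_neg hlt]
      have habs : omin (term t (k, old)) (oadd v (msolve t k.1 k.2)) = term t (k, old) := by
        show omin (oadd old (msolve t k.1 k.2)) (oadd v (msolve t k.1 k.2)) = oadd old (msolve t k.1 k.2)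
        rw [omin_comm]
        exact omin_oadd_le (by omega) _
      exact (ominList_absorb hmem habs).symm

-- keys stay Nodup through the fold
theorem nodup_updA {d : PySem.Dict (Int × Int) Int} (h : d.keys.Nodup) (k : Int × Int) (v : Int) :
    (updA d k v).keys.Nodup := by
  unfold updA
  cases d.get? k with
  | none => exact PySem.Dict.nodup_keys_insert d k v h
  | some old =>
    show (if old > v then d.insert k v else d).keys.Nodup
    split
    · exact PySem.Dict.nodup_keys_insert d k v h
    · exact h

theorem Mval_bodyA (t : List (List Int)) (r : List Int) (cur : PySem.Dict (Int × Int) Int)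
    (hc : cur.keys.Nodup) (e : (Int × Int) × Int) :
    ominList (term t)
      ((let cur' := if e.1.1 - rowA r 0 > 0 then updA cur (e.1.1 - rowA r 0, e.1.2) (e.2 + rowA r 0) else cur
        if e.1.2 - rowA r 1 > 0 then updA cur' (e.1.1, e.1.2 - rowA r 1) e.2 else cur').items)
    = omin (ominList (term t) cur.items) (term (r :: t) e) := by
  have hterm : term (r :: t) e
      = omin (if e.1.1 - rowA r 0 > 0 then oadd (e.2 + rowA r 0) (msolve t (e.1.1 - rowA r 0) e.1.2) else none)
             (if e.1.2 - rowA r 1 > 0 then oadd e.2 (msolve t e.1.1 (e.1.2 - rowA r 1)) else none) := by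
    show oadd e.2 (msolve (r :: t) e.1.1 e.1.2) = _
    rw [show msolve (r :: t) e.1.1 e.1.2
        = omin (if e.1.1 - rowA r 0 > 0 then oadd (rowA r 0) (msolve t (e.1.1 - rowA r 0) e.1.2) else none)
               (if e.1.2 - rowA r 1 > 0 then msolve t e.1.1 (e.1.2 - rowA r 1) else none) from rfl]
    rw [oadd_omin]
    congr 1
    · split
      · rw [oadd_oadd, add_comm (rowA r 0) e.2]
      · rfl
    · split <;> rfl
  by_cases h1 : e.1.1 - rowA r 0 > 0 <;> by_cases h2 : e.1.2 - rowA r 1 > 0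
  · simp only [if_pos h1, if_pos h2]
    rw [Mval_updA t _ (nodup_updA hc _ _), Mval_updA t cur hc, hterm,
      if_pos h1, if_pos h2, omin_assoc]
  · simp only [if_pos h1, if_neg h2]
    rw [Mval_updA t cur hc, hterm, if_pos h1, if_neg h2, omin_none_right]
  · simp only [if_neg h1, if_pos h2]
    rw [Mval_updA t cur hc, hterm, if_neg h1, if_pos h2]
    rfl
  · simp only [if_neg h1, if_neg h2]
    rw [hterm, if_neg h1, if_neg h2, omin_none_right, omin_none_right]

theorem nodup_bodyA (r : List Int) (cur : PySem.Dict (Int × Int) Int)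
    (hc : cur.keys.Nodup) (e : (Int × Int) × Int) :
    ((let cur' := if e.1.1 - rowA r 0 > 0 then updA cur (e.1.1 - rowA r 0, e.1.2) (e.2 + rowA r 0) else cur
      if e.1.2 - rowA r 1 > 0 then updA cur' (e.1.1, e.1.2 - rowA r 1) e.2 else cur')).keys.Nodup := by
  simp only
  split <;> split <;> first
    | exact nodup_updA (nodup_updA hc _ _) _ _
    | exact nodup_updA hc _ _
    | exact hc

theorem Mval_foldA (t : List (List Int)) (r : List Int) (items : List ((Int × Int) × Int))
    (cur : PySem.Dict (Int × Int) Int) (hc : cur.keys.Nodup) :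
    ominList (term t)
      ((items.foldl (fun cur e =>
        let cur := if e.1.1 - rowA r 0 > 0 then updA cur (e.1.1 - rowA r 0, e.1.2) (e.2 + rowA r 0) else cur
        if e.1.2 - rowA r 1 > 0 then updA cur (e.1.1, e.1.2 - rowA r 1) e.2 else cur) cur).items)
    = omin (ominList (term t) cur.items) (ominList (term (r :: t)) items) := by
  induction items generalizing cur with
  | nil => rw [List.foldl_nil, ominList_nil, omin_none_right]
  | cons e rest ih =>
    rw [List.foldl_cons, ih _ (nodup_bodyA r cur hc e), Mval_bodyA t r cur hc e,
      ominList_cons, omin_assoc]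

theorem Mval_stepA (t : List (List Int)) (r : List Int) (prev : PySem.Dict (Int × Int) Int) :
    ominList (term t) ((stepA r prev).items) = ominList (term (r :: t)) prev.items := by
  unfold stepA
  rw [Mval_foldA t r prev.items PySem.Dict.empty PySem.Dict.nodup_keys_empty]
  rfl

theorem Mval_chain (rows : List (List Int)) (d : PySem.Dict (Int × Int) Int) :
    ominList (term []) ((rows.foldl (fun d r => stepA r d) d).items)
    = ominList (term rows) d.items := by
  induction rows generalizing d with
  | nil => rfl
  | cons r t ih => rw [List.foldl_cons, ih, Mval_stepA]

-- bridging A's final `min(dp[-1].values())` to ominList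
theorem foldl_min_comm (t : List Int) (x y : Int) :
    t.foldl min (min x y) = min x (t.foldl min y) := by
  induction t generalizing y with
  | nil => rfl
  | cons z t ih => simp only [List.foldl_cons, min_assoc, ih]

theorem ominList_some_cons (x : Int) (t : List Int) :
    ominList some (x :: t) = some (t.foldl min x) := by
  induction t generalizing x with
  | nil => rfl
  | cons y t' ih =>
    rw [ominList_cons, ih y]
    show some (min x (t'.foldl min y)) = _
    rw [← foldl_min_comm]
    rfl

theorem min?_id_eq_ominList (l : List Int) :
    PySem.List.min? l (fun x => x) = ominList some l := by
  cases l with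
  | nil => exact (PySem.List.min?_eq_none_iff _ _).mpr rfl
  | cons x t => rw [PySem.List.min?_id_cons, ominList_some_cons]

theorem term_nil (e : (Int × Int) × Int) : term [] e = some e.2 := by
  show oadd e.2 (some 0) = some e.2
  simp [oadd]

theorem ominList_term_nil (l : List ((Int × Int) × Int)) :
    ominList (term []) l = ominList some (l.map (·.2)) := by
  induction l with
  | nil => rfl
  | cons e t ih => rw [List.map_cons, ominList_cons, ominList_cons, ih, term_nil]

theorem A_answer (d : PySem.Dict (Int × Int) Int) :
    (if d.items ≠ [] then (PySem.List.min? d.values (fun x => x)).getD 0 else -1)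
    = match ominList (term []) d.items with
      | some v => v
      | none => -1 := by
  rw [ominList_term_nil]
  cases hi : d.items with
  | nil => rfl
  | cons e t =>
    rw [if_pos (by simp : (e :: t : List ((Int × Int) × Int)) ≠ [])]
    have hv : d.values = (e :: t).map (·.2) := by
      simp only [PySem.Dict.values, hi]
    rw [hv, min?_id_eq_ominList, List.map_cons, ominList_some_cons]
    rfl

-- A's explicit dp[0] initialisation equals one stepA from the virtual start state {(n, m): 0}
theorem items_singleton (k : Int × Int) (v : Int) :
    ((PySem.Dict.empty : PySem.Dict (Int × Int) Int).insert k v).items = [(k, v)] := by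
  rw [PySem.Dict.items_insert_of_not_contains]
  · rfl
  · simp [PySem.Dict.contains_empty]

theorem updA_none {d : PySem.Dict (Int × Int) Int} {k : Int × Int} (v : Int) (h : d.get? k = none) :
    updA d k v = d.insert k v := by
  unfold updA; rw [h]

theorem updA_some_le {d : PySem.Dict (Int × Int) Int} {k : Int × Int} {old : Int} (v : Int)
    (h : d.get? k = some old) (hle : ¬ old > v) : updA d k v = d := by
  unfold updA; rw [h]; exact if_neg hle

theorem d0_eq_stepA (row : List Int) (n m : Int) :
    (let d0 : PySem.Dict (Int × Int) Int := PySem.Dict.empty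
     let d0 := if n - rowA row 0 > 0 then d0.insert (n - rowA row 0, m) (rowA row 0) else d0
     if m - rowA row 1 > 0 then d0.insert (n, m - rowA row 1) 0 else d0)
    = stepA row (PySem.Dict.empty.insert (n, m) 0) := by
  have hitems : (PySem.Dict.empty.insert (n, m) 0 : PySem.Dict (Int × Int) Int).items = [((n, m), 0)] :=
    items_singleton _ _
  unfold stepA
  rw [hitems]
  simp only [List.foldl_cons, List.foldl_nil]
  show (if m - rowA row 1 > 0
        then (if n - rowA row 0 > 0 then (PySem.Dict.empty : PySem.Dict (Int × Int) Int).insert (n - rowA row 0, m) (rowA row 0) else PySem.Dict.empty).insert (n, m - rowA row 1) 0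
        else if n - rowA row 0 > 0 then (PySem.Dict.empty : PySem.Dict (Int × Int) Int).insert (n - rowA row 0, m) (rowA row 0) else PySem.Dict.empty)
      = (if m - rowA row 1 > 0
        then updA (if n - rowA row 0 > 0 then updA PySem.Dict.empty (n - rowA row 0, m) (0 + rowA row 0) else PySem.Dict.empty) (n, m - rowA row 1) 0
        else if n - rowA row 0 > 0 then updA PySem.Dict.empty (n - rowA row 0, m) (0 + rowA row 0) else PySem.Dict.empty)
  have hcur : (if n - rowA row 0 > 0 then updA PySem.Dict.empty (n - rowA row 0, m) (0 + rowA row 0) else PySem.Dict.empty)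
      = (if n - rowA row 0 > 0 then (PySem.Dict.empty : PySem.Dict (Int × Int) Int).insert (n - rowA row 0, m) (rowA row 0) else PySem.Dict.empty) := by
    split
    · rw [updA_none _ (PySem.Dict.get?_empty _), zero_add]
    · rfl
  rw [hcur]
  by_cases h2 : m - rowA row 1 > 0
  · simp only [if_pos h2]
    by_cases h1 : n - rowA row 0 > 0
    · simp only [if_pos h1]
      by_cases hcol : (n, m - rowA row 1) = (n - rowA row 0, m)
      · have ha0 : rowA row 0 = 0 := by have h := congrArg Prod.fst hcol; simp at h; omega
        have hb0 : rowA row 1 = 0 := by have h := congrArg Prod.snd hcol; simp at h; omega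
        have hga : ((PySem.Dict.empty : PySem.Dict (Int × Int) Int).insert (n - rowA row 0, m) (rowA row 0)).get? (n, m - rowA row 1) = some (rowA row 0) := by
          rw [PySem.Dict.get?_insert, if_pos hcol]
        rw [updA_some_le 0 hga (by omega)]
        rw [ha0, hb0]
        simp only [sub_zero]
        exact PySem.Dict.insert_insert_self _ _ _ _
      · have hga : ((PySem.Dict.empty : PySem.Dict (Int × Int) Int).insert (n - rowA row 0, m) (rowA row 0)).get? (n, m - rowA row 1) = none := by
          rw [PySem.Dict.get?_insert, if_neg hcol]
          exact PySem.Dict.get?_empty _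
        rw [updA_none 0 hga]
    · simp only [if_neg h1]
      rw [updA_none 0 (PySem.Dict.get?_empty _)]
  · simp only [if_neg h2]

-- the dp list built front-first: its head is the plain fold of stepA
theorem head_dps (rows : List (List Int)) (d : PySem.Dict (Int × Int) Int) (t : List (PySem.Dict (Int × Int) Int)) :
    ((rows.foldl (fun dps row => stepA row (dps.headD PySem.Dict.empty) :: dps) (d :: t)).headD PySem.Dict.empty)
    = rows.foldl (fun d row => stepA row d) d := by
  induction rows generalizing d t with
  | nil => rfl
  | cons r rs ih => simp only [List.foldl, List.headD]; exact ih _ _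

-- ===== B side: the two passes compute msolve at the root =====

theorem pyget_eq_rowA (r : List Int) (j : Int) : (PySem.List.pyGet? r j).getD 0 = rowA r j := rfl

def fbody (r : List Int) (nxt : PySem.Set (Int × Int)) (s : Int × Int) : PySem.Set (Int × Int) :=
  let nxt := if s.1 - rowA r 0 > 0 then PySem.Set.add nxt (s.1 - rowA r 0, s.2) else nxt
  if s.2 - rowA r 1 > 0 then PySem.Set.add nxt (s.1, s.2 - rowA r 1) else nxt

theorem mem_fbody (r : List Int) (acc : PySem.Set (Int × Int)) (s x : Int × Int) :
    x ∈ fbody r acc s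
    ↔ x ∈ acc ∨ (s.1 - rowA r 0 > 0 ∧ x = (s.1 - rowA r 0, s.2)) ∨
        (s.2 - rowA r 1 > 0 ∧ x = (s.1, s.2 - rowA r 1)) := by
  unfold fbody
  simp only
  split_ifs with h2 h1 h1
  · rw [PySem.Set.mem_add, PySem.Set.mem_add]
    constructor
    · rintro ((h | h) | h)
      · exact Or.inl h
      · exact Or.inr (Or.inl ⟨h1, h⟩)
      · exact Or.inr (Or.inr ⟨h2, h⟩)
    · rintro (h | ⟨_, h⟩ | ⟨_, h⟩)
      · exact Or.inl (Or.inl h)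
      · exact Or.inl (Or.inr h)
      · exact Or.inr h
  · rw [PySem.Set.mem_add]
    constructor
    · rintro (h | h)
      · exact Or.inl h
      · exact Or.inr (Or.inr ⟨h2, h⟩)
    · rintro (h | ⟨hc, _⟩ | ⟨_, h⟩)
      · exact Or.inl h
      · exact absurd hc h1
      · exact Or.inr h
  · rw [PySem.Set.mem_add]
    constructor
    · rintro (h | h)
      · exact Or.inl h
      · exact Or.inr (Or.inl ⟨h1, h⟩)
    · rintro (h | ⟨_, h⟩ | ⟨hc, _⟩)
      · exact Or.inl h
      · exact Or.inr h
      · exact absurd hc h2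
  · constructor
    · exact Or.inl
    · rintro (h | ⟨hc, _⟩ | ⟨hc, _⟩)
      · exact h
      · exact absurd hc h1
      · exact absurd hc h2

theorem nodup_fbody (r : List Int) (acc : PySem.Set (Int × Int)) (s : Int × Int)
    (h : acc.Nodup) : (fbody r acc s).Nodup := by
  unfold fbody
  simp only
  split_ifs <;> (repeat' apply PySem.Set.nodup_add) <;> exact h

theorem mem_fwdStep (r : List Int) (cur : PySem.Set (Int × Int)) (x : Int × Int) :
    x ∈ fwdStep r cur ↔ ∃ s ∈ cur,
      (s.1 - rowA r 0 > 0 ∧ x = (s.1 - rowA r 0, s.2)) ∨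
      (s.2 - rowA r 1 > 0 ∧ x = (s.1, s.2 - rowA r 1)) := by
  have hfs : fwdStep r cur = (cur : List (Int × Int)).foldl (fbody r) PySem.Set.empty := rfl
  rw [hfs]
  have key : ∀ (l : List (Int × Int)) (acc : PySem.Set (Int × Int)),
      x ∈ l.foldl (fbody r) acc
      ↔ x ∈ acc ∨ ∃ s ∈ l,
          (s.1 - rowA r 0 > 0 ∧ x = (s.1 - rowA r 0, s.2)) ∨
          (s.2 - rowA r 1 > 0 ∧ x = (s.1, s.2 - rowA r 1)) := by
    intro l
    induction l with
    | nil => intro acc; simp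
    | cons s t ih =>
      intro acc
      rw [List.foldl_cons, ih, mem_fbody r acc s x, List.exists_mem_cons_iff]
      rw [or_assoc]
  rw [key]
  simp [PySem.Set.empty]

theorem nodup_fwdStep (r : List Int) (cur : PySem.Set (Int × Int)) : (fwdStep r cur).Nodup := by
  have hfs : fwdStep r cur = (cur : List (Int × Int)).foldl (fbody r) PySem.Set.empty := rfl
  rw [hfs]
  generalize (cur : List (Int × Int)) = l
  have key : ∀ (acc : PySem.Set (Int × Int)), acc.Nodup → (l.foldl (fbody r) acc).Nodup := by
    induction l with
    | nil => intro acc h; exact h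
    | cons s t ih => intro acc h; exact ih _ (nodup_fbody r acc s h)
  exact key PySem.Set.empty (by simp [PySem.Set.empty])

-- layers list produced by the forward fold, newest first
def buildL : List (List Int) → PySem.Set (Int × Int) → List (PySem.Set (Int × Int))
  | [], l0 => [l0]
  | r :: t, l0 => buildL t (fwdStep r l0) ++ [l0]

theorem buildL_ne_nil (rows : List (List Int)) (l0 : PySem.Set (Int × Int)) :
    buildL rows l0 ≠ [] := by
  cases rows with
  | nil => simp [buildL]
  | cons r t => simp [buildL]

theorem buildL_length (rows : List (List Int)) (l0 : PySem.Set (Int × Int)) :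
    (buildL rows l0).length = rows.length + 1 := by
  induction rows generalizing l0 with
  | nil => rfl
  | cons r t ih => simp [buildL, ih]

theorem fold_revLayers (rows : List (List Int)) (h : PySem.Set (Int × Int))
    (t : List (PySem.Set (Int × Int))) :
    rows.foldl (fun ls r => fwdStep r (ls.headD PySem.Set.empty) :: ls) (h :: t)
    = buildL rows h ++ t := by
  induction rows generalizing h t with
  | nil => rfl
  | cons r rs ih =>
    rw [List.foldl_cons]
    show rs.foldl _ (fwdStep r h :: h :: t) = _
    rw [ih (fwdStep r h) (h :: t)]
    show buildL rs (fwdStep r h) ++ h :: t = (buildL rs (fwdStep r h) ++ [h]) ++ t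
    rw [List.append_cons]

theorem headD_append_singleton {α : Type} (l : List α) (x e : α) (hl : l ≠ []) :
    (l ++ [x]).headD e = l.headD e := by
  cases l with
  | nil => simp at hl
  | cons y t => rfl

-- the backward recursion the zip-fold implements
def bwdAll : List (List Int) → PySem.Set (Int × Int) → PySem.Dict (Int × Int) Int
  | [], layer => layer.foldl (fun d s => d.insert s 0) PySem.Dict.empty
  | r :: t, layer => bwdStep r layer (bwdAll t (fwdStep r layer))

theorem bwd_eq (rows : List (List Int)) (layer : PySem.Set (Int × Int)) :
    ((rows.reverse).zip ((buildL rows layer).tail)).foldl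
      (fun value p => bwdStep p.1 p.2 value)
      (((buildL rows layer).headD PySem.Set.empty).foldl (fun d s => d.insert s 0) PySem.Dict.empty)
    = bwdAll rows layer := by
  induction rows generalizing layer with
  | nil => rfl
  | cons r t ih =>
    rw [List.reverse_cons]
    rw [show buildL (r :: t) layer = buildL t (fwdStep r layer) ++ [layer] from rfl]
    obtain ⟨b0, brest, hb⟩ := List.exists_cons_of_ne_nil (buildL_ne_nil t (fwdStep r layer))
    have hdrop : (buildL t (fwdStep r layer) ++ [layer]).tail
        = (buildL t (fwdStep r layer)).tail ++ [layer] := by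
      rw [hb]; rfl
    have hhead : (buildL t (fwdStep r layer) ++ [layer]).headD PySem.Set.empty
        = (buildL t (fwdStep r layer)).headD PySem.Set.empty :=
      headD_append_singleton _ _ _ (buildL_ne_nil t _)
    rw [hdrop, hhead]
    have hlen : t.reverse.length = ((buildL t (fwdStep r layer)).tail).length := by
      rw [List.length_reverse, List.length_tail, buildL_length]
      omega
    rw [List.zip_append hlen, List.foldl_append]
    rw [ih (fwdStep r layer)]
    rfl

-- computing a dict of zeros over a set
theorem get?_fold_insert0 (l : List (Int × Int)) (d : PySem.Dict (Int × Int) Int) (x : Int × Int) :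
    (l.foldl (fun d s => d.insert s 0) d).get? x = if x ∈ l then some 0 else d.get? x := by
  induction l generalizing d with
  | nil => simp
  | cons s t ih =>
    rw [List.foldl_cons, ih]
    by_cases hxt : x ∈ t
    · simp [hxt, List.mem_cons]
    · rw [if_neg hxt, PySem.Dict.get?_insert]
      by_cases hxs : x = s
      · simp [hxs]
      · simp [List.mem_cons, hxs, hxt]

-- the per-state `best` computation of the backward pass
def bval (r : List Int) (value : PySem.Dict (Int × Int) Int) (s : Int × Int) : Option Int :=
  omin (if s.1 - rowA r 0 > 0 then oadd (rowA r 0) (value.get? (s.1 - rowA r 0, s.2)) else none)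
       (if s.2 - rowA r 1 > 0 then value.get? (s.1, s.2 - rowA r 1) else none)

theorem get?_bwdStep (r : List Int) (layer : PySem.Set (Int × Int)) (hl : layer.Nodup)
    (value : PySem.Dict (Int × Int) Int) (x : Int × Int) :
    (bwdStep r layer value).get? x = if x ∈ layer then bval r value x else none := by
  unfold bwdStep
  have hbody : ∀ (prev : PySem.Dict (Int × Int) Int) (s : Int × Int),
      (let best : Option Int :=
        if s.1 - (PySem.List.pyGet? r 0).getD 0 > 0
        then (value.get? (s.1 - (PySem.List.pyGet? r 0).getD 0, s.2)).map (· + (PySem.List.pyGet? r 0).getD 0)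
        else none
       let best : Option Int :=
        if s.2 - (PySem.List.pyGet? r 1).getD 0 > 0
        then match best, value.get? (s.1, s.2 - (PySem.List.pyGet? r 1).getD 0) with
             | none, v => v
             | some x, none => some x
             | some x, some v => some (min x v)
        else best
       match best with
       | some v => prev.insert s v
       | none => prev)
      = match bval r value s with
        | some v => prev.insert s v
        | none => prev := by
    intro prev s
    have h1 : (if s.1 - rowA r 0 > 0
        then (value.get? (s.1 - rowA r 0, s.2)).map (· + rowA r 0)
        else none)
        = (if s.1 - rowA r 0 > 0 then oadd (rowA r 0) (value.get? (s.1 - rowA r 0, s.2)) else none) := by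
      split
      · rw [map_add_eq_oadd]
      · rfl
    have h2 : ∀ (b v : Option Int),
        (match b, v with
         | none, v => v
         | some x, none => some x
         | some x, some v => some (min x v)) = omin b v := by
      intro b v; cases b <;> cases v <;> rfl
    simp only [pyget_eq_rowA, h1, h2]
    by_cases hg2 : s.2 - rowA r 1 > 0
    · unfold bval
      rw [if_pos hg2, if_pos hg2]
    · unfold bval
      rw [if_neg hg2, if_neg hg2, omin_none_right]
  simp only [hbody]
  have : ∀ (l : List (Int × Int)) (d : PySem.Dict (Int × Int) Int), l.Nodup →
      ((l.foldl (fun prev s =>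
        match bval r value s with
        | some v => prev.insert s v
        | none => prev) d).get? x)
      = if x ∈ l ∧ (bval r value x).isSome then bval r value x else d.get? x := by
    intro l
    induction l with
    | nil => intro d _; simp
    | cons s t ih =>
      intro d hnd
      rw [List.nodup_cons] at hnd
      rw [List.foldl_cons, ih _ hnd.2]
      by_cases hxt : x ∈ t
      · have hxs : x ≠ s := fun h => hnd.1 (h ▸ hxt)
        by_cases hsome : (bval r value x).isSome
        · rw [if_pos ⟨hxt, hsome⟩, if_pos ⟨List.mem_cons_of_mem _ hxt, hsome⟩]
        · rw [if_neg (by tauto), if_neg (by tauto)]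
          cases hbs : bval r value s with
          | none => rfl
          | some v => rw [PySem.Dict.get?_insert, if_neg hxs]
      · rw [if_neg (by tauto)]
        by_cases hxs : x = s
        · subst hxs
          cases hbs : bval r value x with
          | none =>
            rw [if_neg (by simp [hbs])]
          | some v =>
            rw [if_pos ⟨List.mem_cons_self .., by simp [hbs]⟩, PySem.Dict.get?_insert, if_pos rfl]
        · rw [if_neg (by rw [List.mem_cons]; tauto)]
          cases hbs : bval r value s with
          | none => rfl
          | some v => rw [PySem.Dict.get?_insert, if_neg hxs]
  rw [this (layer : List (Int × Int)) PySem.Dict.empty hl]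
  rw [PySem.Dict.get?_empty]
  by_cases hx : x ∈ (layer : List (Int × Int))
  · by_cases hsome : (bval r value x).isSome
    · rw [if_pos ⟨hx, hsome⟩, if_pos hx]
    · rw [if_neg (by tauto), if_pos hx]
      cases hbs : bval r value x with
      | none => rfl
      | some v => rw [hbs] at hsome; simp at hsome
  · rw [if_neg (by tauto), if_neg hx]

theorem bwd_correct (rows : List (List Int)) (layer : PySem.Set (Int × Int)) (hl : layer.Nodup)
    (s : Int × Int) :
    (bwdAll rows layer).get? s = if s ∈ layer then msolve rows s.1 s.2 else none := by
  induction rows generalizing layer s with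
  | nil =>
    rw [bwdAll, get?_fold_insert0, PySem.Dict.get?_empty]
    rfl
  | cons r t ih =>
    rw [bwdAll, get?_bwdStep r layer hl _ s]
    by_cases hs : s ∈ layer
    · rw [if_pos hs, if_pos hs]
      unfold bval
      have hms : msolve (r :: t) s.1 s.2
          = omin (if s.1 - rowA r 0 > 0 then oadd (rowA r 0) (msolve t (s.1 - rowA r 0) s.2) else none)
                 (if s.2 - rowA r 1 > 0 then msolve t s.1 (s.2 - rowA r 1) else none) := rfl
      rw [hms]
      congr 1
      · split
        · rename_i h1
          rw [ih (fwdStep r layer) (nodup_fwdStep r layer) _]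
          rw [if_pos ((mem_fwdStep r layer _).mpr ⟨s, hs, Or.inl ⟨h1, rfl⟩⟩)]
        · rfl
      · split
        · rename_i h2
          rw [ih (fwdStep r layer) (nodup_fwdStep r layer) _]
          rw [if_pos ((mem_fwdStep r layer _).mpr ⟨s, hs, Or.inr ⟨h2, rfl⟩⟩)]
        · rfl
    · rw [if_neg hs, if_neg hs]

-- ===== VERDICT (by name: the statement is the Claim_ definition above) =====
theorem solution_spec : Claim_equal_solution := by
  intro info n m _ hpre
  unfold Spec_solution
  obtain ⟨hne, _⟩ := hpre
  obtain ⟨row0, rest, rfl⟩ := List.exists_cons_of_ne_nil hne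
  show solution (row0 :: rest) n m = solution_alt (row0 :: rest) n m
  unfold solution solution_alt
  simp only [List.drop_one, List.tail_cons]
  have hrow0 : (PySem.List.pyGet? (row0 :: rest) 0).getD [] = row0 := by
    simp [PySem.List.pyGet?, PySem.List.pyIdx?]
  rw [hrow0, head_dps, d0_eq_stepA row0 n m]
  -- A's side equals the matched form of msolve
  have hA : (if ((rest.foldl (fun d row => stepA row d) (stepA row0 (PySem.Dict.empty.insert (n, m) 0)))).items ≠ []
        then (PySem.List.min? ((rest.foldl (fun d row => stepA row d) (stepA row0 (PySem.Dict.empty.insert (n, m) 0)))).values (fun x => x)).getD 0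
        else -1)
      = match msolve (row0 :: rest) n m with
        | some v => v
        | none => -1 := by
    rw [A_answer]
    have hchain := Mval_chain (row0 :: rest) (PySem.Dict.empty.insert (n, m) 0)
    rw [List.foldl_cons] at hchain
    rw [hchain, items_singleton]
    rw [ominList_cons, ominList_nil, omin_none_right]
    show (match term (row0 :: rest) ((n, m), 0) with
          | some v => v
          | none => -1) = _
    rw [show term (row0 :: rest) ((n, m), 0) = oadd 0 (msolve (row0 :: rest) n m) from rfl,
      oadd_zero]
  rw [hA]
  -- B's side equals the same matched form
  rw [fold_revLayers (row0 :: rest) (PySem.Set.ofList [(n, m)]) []]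
  rw [List.append_nil]
  rw [bwd_eq (row0 :: rest) (PySem.Set.ofList [(n, m)])]
  rw [bwd_correct (row0 :: rest) (PySem.Set.ofList [(n, m)]) (PySem.Set.nodup_ofList _) (n, m)]
  have hofl : PySem.Set.ofList [((n : Int), m)] = [(n, m)] :=
    PySem.Set.ofList_eq_self_of_nodup _ (by simp)
  rw [if_pos (by rw [hofl]; exact List.mem_cons_self ..)]

theorem solution_raises : Claim_raises_solution := by
  unfold Claim_raises_solution
  constructor
  · intro info n m _ hr hp; exact hp.1 hr
  · exact ⟨by decide, rfl, by decide⟩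

-- self-check: the raise-region witness facts, read off solution_raises
theorem pvRaiseWitness_solution_ok :
    Raises_solution pvRaiseWitness_solution.1 pvRaiseWitness_solution.2.1 pvRaiseWitness_solution.2.2 ∧
    solution_alt pvRaiseWitness_solution.1 pvRaiseWitness_solution.2.1 pvRaiseWitness_solution.2.2 = pvRaiseWitnessOut_solution := by
  have h := solution_raises
  unfold Claim_raises_solution at h
  exact ⟨h.2.2.1, h.2.2.2⟩
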